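-- pv_equiv track=rewrite | github.com/ML-coder-60/projet4 | model/round.py | sort_index_players_by_points
-- ===== SOURCE A (Python) =====
-- def sort_index_players_by_points(index_player_by_point):
--     """ returns a list of tuple containing the points of the players
--          and the indexes of the players having these points sorted by points
--
--     Returns:
--     - pairs list of tuples
--       [( pointx , [index player, index player, ....]), ( pointy , [index player, index player, ....])]
--     """
--     point_index_players = dict()
--     for key in index_player_by_point.keys():
--         try:
--             point_index_players[str(index_player_by_point[key])].append(str(key))
--         except KeyError:
--             point_index_players[str(index_player_by_point[key])] = [str(key)]
--     return sorted(point_index_players.items(), key=lambda t: t[0], reverse=True)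
-- ===== SOURCE B (Python) =====
-- def sort_index_players_by_points(index_player_by_point):
--     points = sorted({str(v) for v in index_player_by_point.values()}, reverse=True)
--     return [(p, [str(k) for k, v in index_player_by_point.items() if str(v) == p])
--             for p in points]
-- ===== Notes on version B (the rewrite author's own statement) =====
-- stated objective: alternative
-- what changed: B drops A's dict-of-lists accumulator and items sort entirely: it sorts the set of distinct point strings descending and emits each group by one filter pass over the input.
import Mathlib
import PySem

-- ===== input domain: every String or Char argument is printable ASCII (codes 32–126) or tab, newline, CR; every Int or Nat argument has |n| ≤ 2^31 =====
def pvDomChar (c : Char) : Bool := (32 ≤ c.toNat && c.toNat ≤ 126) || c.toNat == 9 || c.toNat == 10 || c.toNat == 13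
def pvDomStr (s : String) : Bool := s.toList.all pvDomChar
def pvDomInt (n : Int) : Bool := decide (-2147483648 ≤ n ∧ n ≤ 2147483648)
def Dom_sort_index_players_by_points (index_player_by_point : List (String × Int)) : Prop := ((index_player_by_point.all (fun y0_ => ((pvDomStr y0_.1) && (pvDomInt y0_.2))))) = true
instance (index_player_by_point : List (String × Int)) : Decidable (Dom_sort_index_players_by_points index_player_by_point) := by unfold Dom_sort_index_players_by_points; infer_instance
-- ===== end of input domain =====

-- B replaces A's dict-of-lists accumulator + items sort by a sorted set of distinct
-- point strings with one filter pass per point (objective: alternative decomposition).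

-- ===== PORT A =====
-- A: for each key, append str(key) to the dict entry at str(points) (try/except = get-or-default),
-- then sort the items by their first component, descending.
def sort_index_players_by_points (index_player_by_point : List (String × Int)) : List (String × List String) :=
  let d := index_player_by_point.foldl
    (fun (d : PySem.Dict String (List String)) kv =>
      d.modify (PySem.Int.toStr kv.2) [] (fun xs => xs ++ [kv.1]))
    PySem.Dict.empty
  PySem.List.sorted d.items (fun t => t.1) true

-- ===== PORT B =====
-- B: sorted set of the point strings, descending; for each, the keys having that point, by filter.
def sort_index_players_by_points_alt (index_player_by_point : List (String × Int)) : List (String × List String) :=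
  let points := PySem.List.sorted
    (PySem.Set.ofList (index_player_by_point.map (fun kv => PySem.Int.toStr kv.2)))
    (fun x => x) true
  points.map (fun p =>
    (p, (index_player_by_point.filter (fun kv => PySem.Int.toStr kv.2 == p)).map (fun kv => kv.1)))

-- ===== PRECONDITION & SPEC =====
def Spec_sort_index_players_by_points (index_player_by_point : List (String × Int)) (out : List (String × List String)) : Prop := out = sort_index_players_by_points_alt index_player_by_point
instance (index_player_by_point : List (String × Int)) (out : List (String × List String)) : Decidable (Spec_sort_index_players_by_points index_player_by_point out) := by unfold Spec_sort_index_players_by_points; infer_instance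

-- ===== CLAIM (what is proved, stated in full; the proofs are below) =====
def Claim_equal_sort_index_players_by_points : Prop := ∀ (index_player_by_point : List (String × Int)), Dom_sort_index_players_by_points index_player_by_point → Spec_sort_index_players_by_points index_player_by_point (sort_index_players_by_points index_player_by_point)

-- ===== LEMMAS AND PROOFS =====

-- the grouping fold, written over the (point-string, key) pairs list
theorem pv_fold_eq (l : List (String × Int)) :
    l.foldl (fun (d : PySem.Dict String (List String)) kv =>
        d.modify (PySem.Int.toStr kv.2) [] (fun xs => xs ++ [kv.1])) PySem.Dict.empty
      = (l.map (fun kv => (PySem.Int.toStr kv.2, kv.1))).foldl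
          (fun (d : PySem.Dict String (List String)) p => d.modify p.1 [] (fun xs => xs ++ [p.2]))
          PySem.Dict.empty := by
  rw [List.foldl_map]

-- sorting (·.1)-descending a list of pairs (p, g p) over distinct p's =
-- mapping over the id-descending sort of the p's
theorem pv_sorted_map (K : List String) (g : String → List String) (hnd : K.Nodup) :
    PySem.List.sorted (K.map (fun p => (p, g p))) (fun t => t.1) true
      = (PySem.List.sorted K (fun x => x) true).map (fun p => (p, g p)) := by
  apply PySem.List.sorted_rev_eq_of_perm_of_pairwise_gt
  · exact (PySem.List.sorted_perm K (fun x => x) true).map _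
  · have hle : (PySem.List.sorted K (fun x => x) true).Pairwise (fun a b => b ≤ a) :=
      PySem.List.sorted_pairwise_rev K (fun x => x)
    have hnd' : (PySem.List.sorted K (fun x => x) true).Nodup :=
      ((PySem.List.sorted_perm K (fun x => x) true).nodup_iff).2 hnd
    have hlt : (PySem.List.sorted K (fun x => x) true).Pairwise (fun a b => b < a) := by
      refine (hle.and hnd').imp ?_
      rintro a b ⟨h1, h2⟩
      exact lt_of_le_of_ne h1 (Ne.symm h2)
    exact List.Pairwise.map _ (fun a b h => h) hlt

-- ===== VERDICT (by name: the statement is the Claim_ definition above) =====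
theorem sort_index_players_by_points_spec : Claim_equal_sort_index_players_by_points := by
  intro l _
  unfold Spec_sort_index_players_by_points
  unfold sort_index_players_by_points sort_index_players_by_points_alt
  rw [pv_fold_eq]
  set l' := l.map (fun kv => (PySem.Int.toStr kv.2, kv.1)) with hl'
  set d := l'.foldl (fun (d : PySem.Dict String (List String)) p =>
    d.modify p.1 [] (fun xs => xs ++ [p.2])) PySem.Dict.empty with hd
  have hkeys : d.keys = PySem.Set.ofList (l.map (fun kv => PySem.Int.toStr kv.2)) := by
    rw [hd, PySem.Dict.keys_foldl_modify_key, PySem.Dict.keys_empty, PySem.Set.update_nil_left,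
      hl', List.map_map]
    rfl
  have hnd : d.keys.Nodup := by
    rw [hkeys]; exact PySem.Set.nodup_ofList _
  have hitems : d.items = d.keys.map (fun k => (k, d.getD k [])) :=
    PySem.Dict.items_eq_map_keys d hnd []
  show PySem.List.sorted d.items (fun t => t.1) true
    = (PySem.List.sorted (PySem.Set.ofList (l.map (fun kv => PySem.Int.toStr kv.2))) (fun x => x) true).map
        (fun p => (p, (l.filter (fun kv => PySem.Int.toStr kv.2 == p)).map (fun kv => kv.1)))
  have hg : ∀ p, d.getD p []
      = (l.filter (fun kv => PySem.Int.toStr kv.2 == p)).map (fun kv => kv.1) := by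
    intro p
    rw [hd, PySem.Dict.getD_foldl_modify_append, PySem.Dict.getD_empty, hl',
      List.filter_map, List.map_map]
    rfl
  rw [hitems, hkeys]
  have : ((PySem.Set.ofList (l.map fun kv => PySem.Int.toStr kv.2)).map
        (fun k => (k, d.getD k [])))
      = (PySem.Set.ofList (l.map fun kv => PySem.Int.toStr kv.2)).map
        (fun p => (p, (l.filter (fun kv => PySem.Int.toStr kv.2 == p)).map (fun kv => kv.1))) := by
    apply List.map_congr_left; intro p _; rw [hg]
  rw [this]
  exact pv_sorted_map _ _ (PySem.Set.nodup_ofList _)
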